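-- pv_equiv track=rewrite | github.com/Rendxnn/Proyecto-Compiladores | ejemplo9.py | rec_w2wt
-- ===== SOURCE A (Python) =====
-- from collections import deque
--
-- def vacia(pila):
--     return 1 if not pila else 0
--
-- def cima(pila):
--     top = pila.pop()
--     pila.append(top)
--     return top
--
-- def desapila(pila):
--     top = pila.pop()
--     if top == '#':
--         pila.append(top)
--     return pila
--
-- def apila_pal(w, pila):
--     for char in w:
--         pila.appendleft(char)
--
-- def rec_w2wt(ent):
--     ent = ent + '#'
--     pila = deque([])
--     acepta = 1
--     i = 0
--     while ent[i] != '2' and ent[i] != '#':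
--         apila_pal(ent[i], pila)
--         i += 1
--     if ent[i] == '2':
--         i += 1
--     else:
--         acepta = 0
--     while vacia(pila) == 0 and cima(pila) == ent[i]:
--         desapila(pila)
--         i += 1
--     if vacia(pila) == 0 or ent[i] != '#':
--         acepta = 0
--     return acepta
-- ===== SOURCE B (Python) =====
-- def rec_w2wt(ent):
--     ent = ent + '#'
--     h = ent.find('#')
--     t = ent.find('2')
--     if t == -1 or h < t:
--         return 0
--     return 1 if ent[t+1:].startswith(ent[:t] + '#') else 0
-- ===== Notes on version B (the rewrite author's own statement) =====
-- stated objective: faster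
-- what changed: B replaces A's character-by-character deque push loop and stack-matching pop loop with two str.find calls to locate the boundary marker and a single startswith slice comparison, moving all scanning into C-level string primitives.
import Mathlib
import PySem

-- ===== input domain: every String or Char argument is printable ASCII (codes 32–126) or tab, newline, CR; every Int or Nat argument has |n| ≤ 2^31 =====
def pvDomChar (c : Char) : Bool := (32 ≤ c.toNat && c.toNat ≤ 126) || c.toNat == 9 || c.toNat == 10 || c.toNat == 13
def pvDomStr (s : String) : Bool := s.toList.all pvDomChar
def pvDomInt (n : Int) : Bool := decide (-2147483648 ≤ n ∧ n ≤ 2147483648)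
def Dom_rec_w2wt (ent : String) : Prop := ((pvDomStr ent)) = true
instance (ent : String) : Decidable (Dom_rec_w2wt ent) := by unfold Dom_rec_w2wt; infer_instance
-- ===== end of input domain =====

-- B replaces the deque push/pop matching loops by boundary search (find) plus one slice comparison (startswith); measured faster in a timing run.

-- ===== PORT A =====
-- pila is A's deque with head = left end: appendleft = cons, pop/cima read the LAST element.

-- first while loop: push chars (appendleft) until ent[i] is '2' or '#'; returns (pila, remaining input).
-- The [] case is Python's IndexError on ent[i]; unreachable because the scanned string ends with the '#' sentinel.
def pvLoop1 (pila : List Char) : List Char → List Char × List Char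
  | [] => (pila, [])
  | c :: rest =>
    if c ≠ '2' ∧ c ≠ '#' then pvLoop1 (c :: pila) rest else (pila, c :: rest)

-- desapila: pop the top; a '#' top is pushed back (so the stack is unchanged).
def pvDesapila (pila : List Char) : List Char :=
  if pila.getLast? = some '#' then pila else pila.dropLast

-- second while loop: while the stack is nonempty and its top (cima) equals ent[i], pop and advance.
-- The [] input case is Python's IndexError on ent[i]; unreachable (the sentinel '#' is never pushed).
def pvLoop2 (pila : List Char) : List Char → List Char × List Char
  | [] => (pila, [])
  | c :: rest =>
    if pila ≠ [] ∧ pila.getLast? = some c then pvLoop2 (pvDesapila pila) rest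
    else (pila, c :: rest)

def rec_w2wt (ent : String) : Int :=
  let s := ent.toList ++ ['#']          -- ent = ent + '#'
  let r1 := pvLoop1 [] s
  let acepta : Int := if r1.2.head? = some '2' then 1 else 0
  let cs2 := if r1.2.head? = some '2' then r1.2.tail else r1.2
  let r2 := pvLoop2 r1.1 cs2
  if r2.1 ≠ [] ∨ r2.2.head? ≠ some '#' then 0 else acepta

-- ===== PORT B =====
def rec_w2wt_alt (ent : String) : Int :=
  let s := ent.toList ++ ['#']          -- ent = ent + '#'
  let h := PySem.Chars.find s ['#']     -- ent.find('#')
  let t := PySem.Chars.find s ['2']     -- ent.find('2')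
  if t = -1 ∨ h < t then 0
  else if PySem.Chars.startswith (PySem.Chars.slice s (some (t + 1)) none)
            (PySem.Chars.slice s none (some t) ++ ['#']) then 1 else 0

-- ===== PRECONDITION & SPEC =====
def Spec_rec_w2wt (ent : String) (out : Int) : Prop := out = rec_w2wt_alt ent
instance (ent : String) (out : Int) : Decidable (Spec_rec_w2wt ent out) := by unfold Spec_rec_w2wt; infer_instance

-- ===== CLAIM (what is proved, stated in full; the proofs are below) =====
def Claim_equal_rec_w2wt : Prop := ∀ (ent : String), Dom_rec_w2wt ent → Spec_rec_w2wt ent (rec_w2wt ent)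

-- ===== LEMMAS AND PROOFS =====

theorem pv_singleton_prefix_iff_head {c : Char} {r : List Char} :
    [c] <+: r ↔ r.head? = some c := by
  cases r with
  | nil => simp
  | cons b r' => simp [List.cons_prefix_cons, eq_comm]

theorem pv_singleton_infix_iff_mem {c : Char} {s : List Char} :
    [c] <:+: s ↔ c ∈ s := by
  constructor
  · rintro ⟨l, r, h⟩
    subst h; simp
  · intro h
    obtain ⟨l, r, rfl⟩ := List.mem_iff_append.mp h
    exact ⟨l, r, by simp⟩

-- find on a singleton pattern occurring first right after a c-free prefix
theorem pv_find_single (p r : List Char) (c : Char) (hp : c ∉ p) :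
    PySem.Chars.find (p ++ c :: r) [c] = (p.length : Int) := by
  have hmem : c ∈ p ++ c :: r := by simp
  have hpos : 0 ≤ PySem.Chars.find (p ++ c :: r) [c] := by
    rw [PySem.Chars.find_nonneg_iff, pv_singleton_infix_iff_mem]; exact hmem
  obtain ⟨hpre, hmin⟩ := PySem.Chars.find_spec (s := p ++ c :: r) (sub := [c]) hpos
  set n := (PySem.Chars.find (p ++ c :: r) [c]).toNat with hn
  have hle : n ≤ p.length := by
    by_contra hlt
    exact hmin p.length (by omega) (by simp)
  have : n = p.length := by
    by_contra hne
    have hlt : n < p.length := by omega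
    have := pv_singleton_prefix_iff_head.mp hpre
    rw [List.head?_drop] at this
    have hget : (p ++ c :: r)[n]? = some c := by
      simpa using this
    rw [List.getElem?_append_left hlt] at hget
    exact hp (List.mem_of_getElem? hget)
  omega

theorem pv_loop1_spec (p : List Char) (hp : ∀ x ∈ p, x ≠ '2' ∧ x ≠ '#')
    (d : Char) (hd : ¬(d ≠ '2' ∧ d ≠ '#')) (r : List Char) :
    ∀ pila, pvLoop1 pila (p ++ d :: r) = (p.reverse ++ pila, d :: r) := by
  induction p with
  | nil => intro pila; simp [pvLoop1, hd]
  | cons a p' ih =>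
    intro pila
    have ha := hp a (by simp)
    simp only [List.cons_append, pvLoop1, if_pos ha]
    rw [ih (fun x hx => hp x (by simp [hx])) (a :: pila)]
    simp

theorem pv_loop2_spec (p : List Char) (hp : '#' ∉ p) :
    ∀ r, (let z := pvLoop2 p.reverse r
          (z.1 = [] ∧ z.2.head? = some '#') ↔ (p ++ ['#']) <+: r) := by
  induction p with
  | nil =>
    intro r
    simp only [List.reverse_nil, List.nil_append]
    cases r with
    | nil => simp [pvLoop2]
    | cons b r' => simp [pvLoop2, eq_comm]
  | cons a p' ih =>
    intro r
    have ha : a ≠ '#' := fun h => hp (by simp [h])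
    have hp' : '#' ∉ p' := fun h => hp (by simp [h])
    cases r with
    | nil =>
      simp only [pvLoop2]
      constructor
      · rintro ⟨h1, _⟩; simp at h1
      · intro h; exact absurd (List.prefix_nil.mp h) (by simp)
    | cons b r' =>
      by_cases hab : a = b
      · subst hab
        have hlast : (a :: p').reverse.getLast? = some a := by
          simp [List.getLast?_reverse]
        have hne : (a :: p').reverse ≠ [] := by simp
        have hdes : pvDesapila (a :: p').reverse = p'.reverse := by
          unfold pvDesapila
          rw [hlast]
          simp [ha, List.reverse_cons]
        simp only [pvLoop2]
        rw [if_pos (And.intro hne hlast), hdes]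
        rw [show ((a :: p') ++ ['#']) <+: (a :: r') ↔ (p' ++ ['#']) <+: r' by
          simp [List.cons_prefix_cons]]
        exact ih hp' r'
      · have hlast : (a :: p').reverse.getLast? = some a := by
          simp [List.getLast?_reverse]
        have hcond : ¬((a :: p').reverse ≠ [] ∧ (a :: p').reverse.getLast? = some b) := by
          rintro ⟨_, h2⟩
          rw [hlast] at h2
          exact hab (Option.some.inj h2)
        simp only [pvLoop2, if_neg hcond]
        constructor
        · rintro ⟨h1, _⟩; simp at h1
        · intro h
          rw [List.cons_append, List.cons_prefix_cons] at h
          exact absurd h.1 hab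
      
-- decomposition of cs ++ ['#'] at the first '2'/'#'
theorem pv_decomp (cs : List Char) :
    ∃ p d r, cs ++ ['#'] = p ++ d :: r ∧ (∀ x ∈ p, x ≠ '2' ∧ x ≠ '#') ∧
      (d = '2' ∨ d = '#') := by
  induction cs with
  | nil => exact ⟨[], '#', [], by simp, by simp, Or.inr rfl⟩
  | cons a cs' ih =>
    by_cases ha : a ≠ '2' ∧ a ≠ '#'
    · obtain ⟨p, d, r, heq, hp, hd⟩ := ih
      exact ⟨a :: p, d, r, by simp [heq], by
        intro x hx
        rcases List.mem_cons.mp hx with h | h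
        · exact h ▸ ha
        · exact hp x h, hd⟩
    · refine ⟨[], a, cs' ++ ['#'], by simp, by simp, ?_⟩
      by_cases h2 : a = '2'
      · exact Or.inl h2
      · exact Or.inr (by tauto)

-- the character at the end of the prefix p in p ++ d :: r
theorem pv_get_mid (p r : List Char) (d : Char) : (p ++ d :: r)[p.length]? = some d := by
  rw [List.getElem?_append_right (Nat.le_refl _)]
  simp

-- if c occurs in s = p ++ d :: r but neither in p nor as d, its first occurrence is past p
theorem pv_find_single_gt (p r : List Char) (c d : Char) (hp : c ∉ p) (hd : c ≠ d)
    (hc : c ∈ p ++ d :: r) : (p.length : Int) < PySem.Chars.find (p ++ d :: r) [c] := by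
  have hpos : 0 ≤ PySem.Chars.find (p ++ d :: r) [c] := by
    rw [PySem.Chars.find_nonneg_iff, pv_singleton_infix_iff_mem]; exact hc
  obtain ⟨hpre, -⟩ := PySem.Chars.find_spec (s := p ++ d :: r) (sub := [c]) hpos
  set n := (PySem.Chars.find (p ++ d :: r) [c]).toNat with hn
  have hget : (p ++ d :: r)[n]? = some c := by
    have := pv_singleton_prefix_iff_head.mp hpre
    rw [List.head?_drop] at this
    simpa using this
  have h1 : ¬ n < p.length := by
    intro hlt
    rw [List.getElem?_append_left hlt] at hget
    exact hp (List.mem_of_getElem? hget)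
  have h2 : n ≠ p.length := by
    intro he
    rw [he, pv_get_mid] at hget
    exact hd (Option.some.inj hget).symm
  omega

-- ===== VERDICT (by name: the statement is the Claim_ definition above) =====
theorem rec_w2wt_spec : Claim_equal_rec_w2wt := by
  intro ent _
  unfold Spec_rec_w2wt rec_w2wt rec_w2wt_alt
  obtain ⟨p, d, r, heq, hp, hd⟩ := pv_decomp ent.toList
  rw [heq]
  dsimp only
  have hd' : ¬(d ≠ '2' ∧ d ≠ '#') := by tauto
  rw [pv_loop1_spec p hp d hd' r []]
  simp only [List.append_nil, List.head?_cons, List.tail_cons]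
  have hph : '#' ∉ p := fun h => (hp _ h).2 rfl
  have hp2 : '2' ∉ p := fun h => (hp _ h).1 rfl
  rcases hd with rfl | rfl
  · -- d = '2'
    simp only [reduceIte]
    have hmem : '#' ∈ p ++ '2' :: r := by rw [← heq]; simp
    have ht : PySem.Chars.find (p ++ '2' :: r) ['2'] = (p.length : Int) :=
      pv_find_single p r '2' hp2
    have hh : (p.length : Int) < PySem.Chars.find (p ++ '2' :: r) ['#'] :=
      pv_find_single_gt p r '#' '2' hph (by decide) hmem
    have hc1 : ¬((p.length : Int) = -1 ∨
        PySem.Chars.find (p ++ '2' :: r) ['#'] < (p.length : Int)) := by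
      rintro (h | h)
      · omega
      · exact absurd h (not_lt.mpr hh.le)
    have hs1 : PySem.Chars.slice (p ++ '2' :: r) (some ((p.length : Int) + 1)) none = r := by
      rw [show ((p.length : Int) + 1) = ((p.length + 1 : Nat) : Int) by push_cast; ring,
          PySem.Chars.slice_eq_listSlice, PySem.List.slice_from_natCast]
      simp [List.drop_append]
    have hs2 : PySem.Chars.slice (p ++ '2' :: r) none (some (p.length : Int)) = p := by
      rw [PySem.Chars.slice_eq_listSlice, PySem.List.slice_to_natCast]
      exact List.take_left
    rw [ht, if_neg hc1, hs1, hs2]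
    have hiff := pv_loop2_spec p hph r
    dsimp only at hiff
    by_cases hpre : (p ++ ['#']) <+: r
    · obtain ⟨h1, h2⟩ := hiff.mpr hpre
      rw [if_neg (by simp [h1, h2]),
          if_pos ((PySem.Chars.startswith_iff _ _).mpr hpre)]
    · have hn := (not_iff_not.mpr hiff).mpr hpre
      rw [if_pos (by tauto),
          if_neg (by rw [PySem.Chars.startswith_iff _ _]; exact hpre)]
  · -- d = '#'
    rw [if_neg (show ¬ (some '#' = some '2') by decide)]
    rw [if_neg (show ¬ (some '#' = some '2') by decide)]
    have hrhs : (PySem.Chars.find (p ++ '#' :: r) ['2'] = -1 ∨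
        PySem.Chars.find (p ++ '#' :: r) ['#'] < PySem.Chars.find (p ++ '#' :: r) ['2']) := by
      by_cases h2 : '2' ∈ p ++ '#' :: r
      · exact Or.inr (by
          rw [pv_find_single p r '#' hph]
          exact pv_find_single_gt p r '2' '#' hp2 (by decide) h2)
      · exact Or.inl ((PySem.Chars.find_eq_neg_one_iff _ _).mpr
          (fun h => h2 (pv_singleton_infix_iff_mem.mp h)))
    rw [if_pos hrhs, ite_self]
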